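-- pv_equiv track=rewrite | github.com/spurtzel/DSS | FlinkCEPPA/deploying/config_generator/config_generator_centralized.py | parse_aggregator_name
-- ===== SOURCE A (Python) =====
-- def parse_aggregator_name(agg_name, known_aggregators):
--     result = []
--     i = 0
--     while i < len(agg_name):
--         matched = False
--         for length in range(len(agg_name) - i, 0, -1):
--             candidate = agg_name[i : i + length]
--             if candidate in known_aggregators:
--                 result.append(candidate)
--                 i += length
--                 matched = True
--                 break
--         if not matched:
--             result.append(agg_name[i])
--             i += 1
--     return result
-- ===== SOURCE B (Python) =====
-- def parse_aggregator_name(agg_name, known_aggregators):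
--     # One forward scan over the string: at each position take the longest
--     # known aggregator that is a prefix of the remaining suffix (found by a
--     # single pass over known_aggregators), instead of testing every possible
--     # substring length for list membership.
--     result = []
--     rest = agg_name
--     while rest:
--         best = 0
--         for w in known_aggregators:
--             if w and rest.startswith(w) and len(w) > best:
--                 best = len(w)
--         if best:
--             result.append(rest[:best])
--             rest = rest[best:]
--         else:
--             result.append(rest[0])
--             rest = rest[1:]
--     return result
-- ===== Notes on version B (the rewrite author's own statement) =====
-- stated objective: faster
-- what changed: Instead of trying every substring length at each position and testing list membership (an inner scan of known_aggregators per length), B makes one pass over known_aggregators per position, keeping the longest one that is a prefix of the remaining suffix.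
import Mathlib
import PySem

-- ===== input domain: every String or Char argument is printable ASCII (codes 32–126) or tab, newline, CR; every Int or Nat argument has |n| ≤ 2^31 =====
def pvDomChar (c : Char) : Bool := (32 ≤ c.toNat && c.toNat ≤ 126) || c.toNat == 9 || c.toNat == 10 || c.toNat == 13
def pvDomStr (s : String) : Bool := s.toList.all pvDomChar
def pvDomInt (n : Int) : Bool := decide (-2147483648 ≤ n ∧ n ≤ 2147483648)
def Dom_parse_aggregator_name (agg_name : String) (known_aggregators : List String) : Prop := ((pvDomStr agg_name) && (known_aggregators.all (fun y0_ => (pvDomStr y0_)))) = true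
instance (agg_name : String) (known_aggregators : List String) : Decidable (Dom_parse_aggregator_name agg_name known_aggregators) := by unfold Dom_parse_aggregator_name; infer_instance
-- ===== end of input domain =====

-- B replaces A's per-position scan over all substring lengths (each a list membership
-- test) by a single pass over known_aggregators keeping the longest prefix match: faster.

-- ===== PORT A =====
-- inner 'for length in range(len(agg_name) - i, 0, -1)': counts lengths down from n to 1,
-- returns the first length whose slice agg_name[i:i+length] is in known_aggregators
def pvA_find (cs : List Char) (ks : List String) (i : Nat) : Nat → Option Nat
  | 0 => none
  | l + 1 =>
    if ks.contains (String.ofList (PySem.List.slice cs (some (i : Int)) (some ((i : Int) + ((l + 1 : Nat) : Int))))) then some (l + 1)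
    else pvA_find cs ks i l

theorem pvA_find_pos (cs : List Char) (ks : List String) (i : Nat) :
    ∀ n l, pvA_find cs ks i n = some l → 1 ≤ l ∧ l ≤ n := by
  intro n
  induction n with
  | zero => intro l h; simp [pvA_find] at h
  | succ m ih =>
    intro l h
    unfold pvA_find at h
    split at h
    · cases h; omega
    · have := ih l h; omega

-- outer 'while i < len(agg_name)' with the result accumulator
def pvA_loop (cs : List Char) (ks : List String) (i : Nat) (acc : List String) : List String :=
  if h : i < cs.length then
    match hf : pvA_find cs ks i (cs.length - i) with
    | some l =>
        pvA_loop cs ks (i + l) (acc ++ [String.ofList (PySem.List.slice cs (some (i : Int)) (some ((i : Int) + (l : Int))))])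
    | none =>
        -- agg_name[i]: i is in range (h), so Python indexing returns cs[i]
        pvA_loop cs ks (i + 1) (acc ++ [String.ofList [cs[i]]])
  else acc
termination_by cs.length - i
decreasing_by
  · have := pvA_find_pos cs ks i (cs.length - i) l hf; omega
  · omega

def parse_aggregator_name (agg_name : String) (known_aggregators : List String) : List String :=
  pvA_loop agg_name.toList known_aggregators 0 []

-- ===== PORT B =====
-- 'for w in known_aggregators: if w and rest.startswith(w) and len(w) > best: best = len(w)'
def pvB_best (rest : List Char) (ks : List String) : Nat :=
  ks.foldl
    (fun best w =>
      if w ≠ "" ∧ PySem.Chars.startswith rest w.toList = true ∧ best < w.toList.length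
      then w.toList.length else best) 0

-- 'while rest:' consuming the matched prefix (or one char) each turn
def pvB_go (ks : List String) : List Char → List String
  | [] => []
  | c :: rs =>
    if _hb : pvB_best (c :: rs) ks = 0 then String.ofList [c] :: pvB_go ks rs
    else String.ofList ((c :: rs).take (pvB_best (c :: rs) ks)) :: pvB_go ks ((c :: rs).drop (pvB_best (c :: rs) ks))
termination_by rest => rest.length
decreasing_by
  · simp
  · simp; omega

def parse_aggregator_name_alt (agg_name : String) (known_aggregators : List String) : List String :=
  pvB_go known_aggregators agg_name.toList

-- ===== PRECONDITION & SPEC =====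
def Spec_parse_aggregator_name (agg_name : String) (known_aggregators : List String) (out : List String) : Prop := out = parse_aggregator_name_alt agg_name known_aggregators
instance (agg_name : String) (known_aggregators : List String) (out : List String) : Decidable (Spec_parse_aggregator_name agg_name known_aggregators out) := by unfold Spec_parse_aggregator_name; infer_instance

-- ===== CLAIM (what is proved, stated in full; the proofs are below) =====
def Claim_equal_parse_aggregator_name : Prop := ∀ (agg_name : String) (known_aggregators : List String), Dom_parse_aggregator_name agg_name known_aggregators → Spec_parse_aggregator_name agg_name known_aggregators (parse_aggregator_name agg_name known_aggregators)

-- ===== LEMMAS AND PROOFS =====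

-- 'a length-l match exists at the current suffix'
def pvMatch (rest : List Char) (ks : List String) (l : Nat) : Prop :=
  String.ofList (rest.take l) ∈ ks

theorem pvA_find_P (cs : List Char) (ks : List String) (i l : Nat) :
    (ks.contains (String.ofList (PySem.List.slice cs (some (i : Int)) (some ((i : Int) + (l : Int))))) = true)
      ↔ pvMatch (cs.drop i) ks l := by
  rw [PySem.List.slice_natCast_add]
  simp [pvMatch]

-- pvA_find returns l when l matches and nothing longer does
theorem pvA_find_eq_some (cs : List Char) (ks : List String) (i : Nat) :
    ∀ n l, 1 ≤ l → l ≤ n → pvMatch (cs.drop i) ks l →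
      (∀ l', l < l' → l' ≤ n → ¬ pvMatch (cs.drop i) ks l') → pvA_find cs ks i n = some l := by
  intro n
  induction n with
  | zero => intro l h1 h2 _ _; omega
  | succ m ih =>
    intro l h1 h2 hm hmax
    unfold pvA_find
    by_cases he : l = m + 1
    · subst he
      rw [if_pos ((pvA_find_P cs ks i (m + 1)).mpr hm)]
    · rw [if_neg, ih l h1 (by omega) hm]
      · intro l' hl' hl'2; exact hmax l' hl' (by omega)
      · intro hc
        exact hmax (m + 1) (by omega) le_rfl ((pvA_find_P cs ks i (m + 1)).mp hc)

-- the fold step of pvB_best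
def pvStep (rest : List Char) (best : Nat) (w : String) : Nat :=
  if w ≠ "" ∧ PySem.Chars.startswith rest w.toList = true ∧ best < w.toList.length
  then w.toList.length else best

theorem pvStep_ge (rest : List Char) (best : Nat) (w : String) : best ≤ pvStep rest best w := by
  unfold pvStep; split
  · omega
  · exact le_rfl

theorem pvFold_ge (rest : List Char) (ks : List String) :
    ∀ init, init ≤ ks.foldl (pvStep rest) init := by
  induction ks with
  | nil => intro init; simp
  | cons w ks ih =>
    intro init
    exact le_trans (pvStep_ge rest init w) (ih (pvStep rest init w))

-- upper bound: every nonempty prefix-matching word is ≤ the fold result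
theorem pvFold_ub (rest : List Char) (ks : List String) :
    ∀ init w, w ∈ ks → w ≠ "" → w.toList <+: rest →
      w.toList.length ≤ ks.foldl (pvStep rest) init := by
  induction ks with
  | nil => intro _ w h; simp at h
  | cons v ks ih =>
    intro init w hw hne hpre
    rcases List.mem_cons.mp hw with h | h
    · subst h
      refine le_trans ?_ (pvFold_ge rest ks (pvStep rest init w))
      unfold pvStep
      split
      · exact le_rfl
      · rename_i hcond
        have hs : PySem.Chars.startswith rest w.toList = true :=
          (PySem.Chars.startswith_iff rest w.toList).mpr hpre
        by_cases hlt : init < w.toList.length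
        · exact absurd ⟨hne, hs, hlt⟩ hcond
        · omega
    · exact ih (pvStep rest init v) w h hne hpre

-- the fold result is its initial value or realized by a matching word
theorem pvFold_mem (rest : List Char) (ks : List String) :
    ∀ init, ks.foldl (pvStep rest) init = init ∨
      ∃ w ∈ ks, w ≠ "" ∧ w.toList <+: rest ∧ ks.foldl (pvStep rest) init = w.toList.length := by
  induction ks with
  | nil => intro init; left; rfl
  | cons v ks ih =>
    intro init
    rcases ih (pvStep rest init v) with h | ⟨w, hw, hne, hpre, heq⟩
    · simp only [List.foldl_cons, h]
      unfold pvStep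
      split
      · rename_i hcond
        right
        exact ⟨v, List.mem_cons_self .., hcond.1,
          (PySem.Chars.startswith_iff rest v.toList).mp hcond.2.1, rfl⟩
      · left; rfl
    · right
      exact ⟨w, List.mem_cons_of_mem v hw, hne, hpre, heq⟩

theorem pvB_best_eq_fold (rest : List Char) (ks : List String) :
    pvB_best rest ks = ks.foldl (pvStep rest) 0 := rfl

-- pvMatch ↔ a matching word, for l within the suffix
theorem pvMatch_iff (rest : List Char) (ks : List String) (l : Nat) (h1 : 1 ≤ l) (h2 : l ≤ rest.length) :
    pvMatch rest ks l ↔ ∃ w ∈ ks, w ≠ "" ∧ w.toList <+: rest ∧ w.toList.length = l := by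
  constructor
  · intro hm
    refine ⟨String.ofList (rest.take l), hm, ?_, ?_, ?_⟩
    · intro hc
      have h0 : rest.take l = [] := by
        have := congrArg String.toList hc
        simpa using this
      have h1' : (rest.take l).length = 0 := by rw [h0]; rfl
      rw [List.length_take] at h1'; omega
    · rw [String.toList_ofList]; exact List.take_prefix l rest
    · rw [String.toList_ofList, List.length_take]; omega
  · rintro ⟨w, hw, hne, hpre, hlen⟩
    have ht : rest.take l = w.toList := by
      have := List.prefix_iff_eq_take.mp hpre
      rw [hlen] at this; exact this.symm
    unfold pvMatch
    rw [ht, String.ofList_toList]; exact hw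

-- one-step unfolding of pvB_go on a nonempty suffix
theorem pvB_go_cons (ks : List String) (c : Char) (rs : List Char) :
    pvB_go ks (c :: rs) =
      if pvB_best (c :: rs) ks = 0 then String.ofList [c] :: pvB_go ks rs
      else String.ofList ((c :: rs).take (pvB_best (c :: rs) ks)) :: pvB_go ks ((c :: rs).drop (pvB_best (c :: rs) ks)) := by
  rw [pvB_go]
  split <;> simp

-- pvA_find only returns genuine matches
theorem pvA_find_sound (cs : List Char) (ks : List String) (i : Nat) :
    ∀ n l, pvA_find cs ks i n = some l → pvMatch (cs.drop i) ks l := by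
  intro n
  induction n with
  | zero => intro l h; simp [pvA_find] at h
  | succ m ih =>
    intro l h
    unfold pvA_find at h
    split at h
    · rename_i hc
      cases h
      exact (pvA_find_P cs ks i (m + 1)).mp hc
    · exact ih l h

-- main loop equivalence, by induction on the remaining length
theorem pvLoop_eq (cs : List Char) (ks : List String) :
    ∀ n i acc, cs.length - i ≤ n → pvA_loop cs ks i acc = acc ++ pvB_go ks (cs.drop i) := by
  intro n
  induction n with
  | zero =>
    intro i acc h
    unfold pvA_loop
    rw [dif_neg (by omega), List.drop_eq_nil_of_le (by omega)]
    simp [pvB_go]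
  | succ m ih =>
    intro i acc h
    by_cases hi : i < cs.length
    · -- rest = cs.drop i is nonempty
      have hrl : (cs.drop i).length = cs.length - i := by simp
      obtain ⟨c, rs, hrest⟩ : ∃ c rs, cs.drop i = c :: rs := by
        cases hd : cs.drop i with
        | nil => rw [hd] at hrl; simp at hrl; omega
        | cons c rs => exact ⟨c, rs, rfl⟩
      set b := pvB_best (cs.drop i) ks with hbdef
      have hub : ∀ l, 1 ≤ l → l ≤ cs.length - i → pvMatch (cs.drop i) ks l → l ≤ b := by
        intro l h1 h2 hm
        obtain ⟨w, hw, hne, hpre, hlen⟩ := (pvMatch_iff (cs.drop i) ks l h1 (by omega)).mp hm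
        rw [hbdef, pvB_best_eq_fold]
        exact hlen ▸ pvFold_ub (cs.drop i) ks 0 w hw hne hpre
      have hc : cs[i] = c := by
        have h0 : (cs.drop i)[0]'(by rw [hrest]; simp) = c := by simp [hrest]
        simpa using h0
      have hdrop1 : cs.drop (i + 1) = rs := by
        have hdd : List.drop 1 (List.drop i cs) = List.drop (i + 1) cs :=
          List.drop_drop (i := 1) (j := i) (l := cs)
        rw [← hdd, hrest]; rfl
      unfold pvA_loop
      rw [dif_pos hi]
      split
      · -- A matched some length l
        rename_i l heq
        have hml : pvMatch (cs.drop i) ks l := pvA_find_sound cs ks i _ l heq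
        have hbl := pvA_find_pos cs ks i _ l heq
        have hlb : l ≤ b := hub l hbl.1 hbl.2 hml
        have hb : b ≠ 0 := by omega
        -- b itself is a match, of maximal length
        rcases pvFold_mem (cs.drop i) ks 0 with h0 | ⟨w, hw, hne, hpre, hfold⟩
        · rw [pvB_best_eq_fold] at hbdef; omega
        · have hble : b ≤ cs.length - i := by
            rw [hbdef, pvB_best_eq_fold, hfold]
            have := hpre.length_le; omega
          have hmb : pvMatch (cs.drop i) ks b :=
            (pvMatch_iff (cs.drop i) ks b (by omega) (by omega)).mpr
              ⟨w, hw, hne, hpre, by rw [hbdef, pvB_best_eq_fold, hfold]⟩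
          have hsome : pvA_find cs ks i (cs.length - i) = some b := by
            apply pvA_find_eq_some cs ks i _ b (by omega) hble hmb
            intro l' hl' hl'2 hm'
            have := hub l' (by omega) hl'2 hm'; omega
          rw [heq] at hsome
          cases hsome
          rw [ih (i + b) _ (by omega)]
          have hdropb : cs.drop (i + b) = (cs.drop i).drop b :=
            (List.drop_drop (i := b) (j := i) (l := cs)).symm
          have hslice : PySem.List.slice cs (some (i : Int)) (some ((i : Int) + (b : Int))) = (cs.drop i).take b :=
            PySem.List.slice_natCast_add cs i b
          conv_rhs => rw [hrest, pvB_go_cons, ← hrest, ← hbdef]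
          rw [if_neg hb, hdropb, hslice]
          simp
      · -- A found no match: b must be 0
        rename_i heq
        have hb : b = 0 := by
          by_contra hb
          rcases pvFold_mem (cs.drop i) ks 0 with h0 | ⟨w, hw, hne, hpre, hfold⟩
          · rw [pvB_best_eq_fold] at hbdef; omega
          · have hble : b ≤ cs.length - i := by
              rw [hbdef, pvB_best_eq_fold, hfold]
              have := hpre.length_le; omega
            have hmb : pvMatch (cs.drop i) ks b :=
              (pvMatch_iff (cs.drop i) ks b (by omega) (by omega)).mpr
                ⟨w, hw, hne, hpre, by rw [hbdef, pvB_best_eq_fold, hfold]⟩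
            have hsome : pvA_find cs ks i (cs.length - i) = some b := by
              apply pvA_find_eq_some cs ks i _ b (by omega) hble hmb
              intro l' hl' hl'2 hm'
              have := hub l' (by omega) hl'2 hm'; omega
            rw [heq] at hsome; cases hsome
        rw [ih (i + 1) _ (by omega)]
        conv_rhs => rw [hrest, pvB_go_cons, ← hrest, ← hbdef]
        rw [if_pos hb, hdrop1, hc]
        simp
    · unfold pvA_loop
      rw [dif_neg hi, List.drop_eq_nil_of_le (by omega)]
      simp [pvB_go]

-- ===== VERDICT (by name: the statement is the Claim_ definition above) =====
theorem parse_aggregator_name_spec : Claim_equal_parse_aggregator_name := by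
  intro agg_name known_aggregators _
  unfold Spec_parse_aggregator_name parse_aggregator_name parse_aggregator_name_alt
  rw [pvLoop_eq agg_name.toList known_aggregators agg_name.toList.length 0 [] (by omega)]
  simp
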